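-- pv_equiv track=rewrite | github.com/joeheartless/Plir-256 | plir-256.py | expand_message_deterministic
-- ===== SOURCE A (Python) =====
-- def rotate_left(x, n):
--     x &= 0xFFFFFFFF
--     return ((x << n) & 0xFFFFFFFF) | (x >> (32 - n))
--
-- def sum_ascii(text):
--     total = 0
--     for ch in text:
--         total += ord(ch)
--     return total
--
-- def expand_message_deterministic(text):
--     text_len = len(text)
--     out_len = (text_len + 3) // 4
--
--     blocks = []
--     s_val = sum_ascii(text)
--     seed = (s_val * 137) & 0xFFFFFFFF
--
--     for i in range(out_len):
--         chunk = [ord(' '), ord(' '), ord(' '), ord(' ')]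
--         start_idx = i * 4
--         for j in range(4):
--             if (start_idx + j) < text_len:
--                 chunk[j] = ord(text[start_idx + j])
--
--         block_val = (chunk[0]
--                     | (chunk[1] << 8)
--                     | (chunk[2] << 16)
--                     | (chunk[3] << 24))
--         block_val &= 0xFFFFFFFF
--
--         shift_val = (seed >> (i % 16)) & 0xFFFFFFFF
--
--         block_val ^= shift_val
--         block_val &= 0xFFFFFFFF
--
--         seed = rotate_left(seed, 5) ^ ((seed * 71) & 0xFFFFFFFF)
--         seed &= 0xFFFFFFFF
--
--         blocks.append(block_val)
--
--     return blocks, out_len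
-- ===== SOURCE B (Python) =====
-- def rotate_left(x, n):
--     x &= 0xFFFFFFFF
--     return ((x << n) & 0xFFFFFFFF) | (x >> (32 - n))
--
-- def expand_message_deterministic(text):
--     # Streaming byte accumulator: one pass over the characters, emitting a word
--     # whenever four bytes have been shifted in; a final flush space-pads the tail.
--     seed = (sum(ord(c) for c in text) * 137) & 0xFFFFFFFF
--     blocks = []
--     acc = 0
--     pos = 0
--     i = 0
--     for ch in text:
--         acc |= ord(ch) << (8 * pos)
--         pos += 1
--         if pos == 4:
--             word = acc & 0xFFFFFFFF
--             blocks.append((word ^ ((seed >> (i % 16)) & 0xFFFFFFFF)) & 0xFFFFFFFF)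
--             seed = (rotate_left(seed, 5) ^ ((seed * 71) & 0xFFFFFFFF)) & 0xFFFFFFFF
--             acc = 0
--             pos = 0
--             i += 1
--     if pos > 0:
--         for p in range(pos, 4):
--             acc |= 0x20 << (8 * p)
--         word = acc & 0xFFFFFFFF
--         blocks.append((word ^ ((seed >> (i % 16)) & 0xFFFFFFFF)) & 0xFFFFFFFF)
--         i += 1
--     return blocks, i
-- ===== Notes on version B (the rewrite author's own statement) =====
-- stated objective: alternative
-- what changed: A loops over block indices and rebuilds each 4-byte chunk with an inner guarded loop indexing into the text; B makes a single streaming pass over the characters, shifting each byte into an accumulator and emitting a word whenever four bytes are buffered, with one space-padded flush for the tail.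
import Mathlib
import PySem

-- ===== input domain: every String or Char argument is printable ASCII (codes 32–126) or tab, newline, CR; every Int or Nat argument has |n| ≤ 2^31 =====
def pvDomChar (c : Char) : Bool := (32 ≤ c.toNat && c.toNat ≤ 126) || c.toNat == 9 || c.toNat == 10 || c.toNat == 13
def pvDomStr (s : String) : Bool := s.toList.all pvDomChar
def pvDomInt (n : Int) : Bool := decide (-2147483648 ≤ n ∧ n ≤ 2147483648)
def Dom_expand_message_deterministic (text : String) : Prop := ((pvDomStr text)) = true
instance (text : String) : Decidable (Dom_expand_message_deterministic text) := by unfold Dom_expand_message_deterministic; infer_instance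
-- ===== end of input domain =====

-- B replaces A's block-indexed loop (with its inner 4-step chunk loop) by a single streaming pass
-- over the characters that shifts bytes into an accumulator and emits a word every four bytes,
-- space-padding only the final flush; objective: alternative decomposition, same cost.

-- ===== PORT A =====
-- rotate_left is only ever called with the literal shift 5, so n : Nat is exact here.
def rotate_left (x : Int) (n : Nat) : Int :=
  let x := PySem.Int.band x 0xFFFFFFFF
  PySem.Int.bor (PySem.Int.band (x <<< n) 0xFFFFFFFF) (x >>> (32 - n))

def sum_ascii (cs : List Char) : Int :=
  cs.foldl (fun total ch => total + (ch.toNat : Int)) 0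

def expand_message_deterministic (text : String) : List Int × Int :=
  let cs := text.toList
  let text_len : Int := (cs.length : Int)
  let out_len : Int := PySem.Int.floordiv (text_len + 3) 4
  let s_val := sum_ascii cs
  let seed0 := PySem.Int.band (s_val * 137) 0xFFFFFFFF
  let res := (PySem.List.pyRange 0 out_len 1).foldl
    (fun (st : List Int × Int) i =>
      let start_idx := i * 4
      -- the guard makes text[start_idx+j] in range, so pyGetD is exact (no IndexError possible)
      let chunk := (PySem.List.pyRange 0 4 1).foldl
        (fun ch j =>
          if start_idx + j < text_len then
            PySem.List.pySetD ch j ((PySem.List.pyGetD cs (start_idx + j) ' ').toNat : Int)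
          else ch)
        [32, 32, 32, 32]
      let block_val :=
        PySem.Int.bor (PySem.Int.bor (PySem.Int.bor
          (PySem.List.pyGetD chunk 0 0)
          ((PySem.List.pyGetD chunk 1 0) <<< 8))
          ((PySem.List.pyGetD chunk 2 0) <<< 16))
          ((PySem.List.pyGetD chunk 3 0) <<< 24)
      let block_val := PySem.Int.band block_val 0xFFFFFFFF
      let shift_val := PySem.Int.band (st.2 >>> (PySem.Int.mod i 16).toNat) 0xFFFFFFFF
      let block_val := PySem.Int.band (PySem.Int.bxor block_val shift_val) 0xFFFFFFFF
      (st.1 ++ [block_val],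
       PySem.Int.band (PySem.Int.bxor (rotate_left st.2 5) (PySem.Int.band (st.2 * 71) 0xFFFFFFFF)) 0xFFFFFFFF))
    ([], seed0)
  (res.1, out_len)

-- ===== PORT B =====
-- state tuple = (blocks, acc, pos, seed, i), exactly Source B's five loop variables;
-- altStep is the loop body, altFlush the trailing `if pos > 0` flush of Source B
def altStep (st : List Int × Int × Int × Int × Int) (ch : Char) : List Int × Int × Int × Int × Int :=
  if st.2.2.1 + 1 == 4 then
    (st.1 ++ [PySem.Int.band (PySem.Int.bxor
        (PySem.Int.band (PySem.Int.bor st.2.1 ((ch.toNat : Int) <<< (8 * st.2.2.1).toNat)) 0xFFFFFFFF)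
        (PySem.Int.band (st.2.2.2.1 >>> (PySem.Int.mod st.2.2.2.2 16).toNat) 0xFFFFFFFF)) 0xFFFFFFFF],
     0, 0,
     PySem.Int.band (PySem.Int.bxor (rotate_left st.2.2.2.1 5)
       (PySem.Int.band (st.2.2.2.1 * 71) 0xFFFFFFFF)) 0xFFFFFFFF,
     st.2.2.2.2 + 1)
  else
    (st.1, PySem.Int.bor st.2.1 ((ch.toNat : Int) <<< (8 * st.2.2.1).toNat),
     st.2.2.1 + 1, st.2.2.2.1, st.2.2.2.2)

def altFlush (st : List Int × Int × Int × Int × Int) : List Int × Int :=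
  if st.2.2.1 > 0 then
    (st.1 ++ [PySem.Int.band (PySem.Int.bxor
        (PySem.Int.band ((PySem.List.pyRange st.2.2.1 4 1).foldl
            (fun a p => PySem.Int.bor a ((32 : Int) <<< (8 * p).toNat)) st.2.1) 0xFFFFFFFF)
        (PySem.Int.band (st.2.2.2.1 >>> (PySem.Int.mod st.2.2.2.2 16).toNat) 0xFFFFFFFF)) 0xFFFFFFFF],
     st.2.2.2.2 + 1)
  else (st.1, st.2.2.2.2)

def expand_message_deterministic_alt (text : String) : List Int × Int :=
  let cs := text.toList
  let seed0 := PySem.Int.band ((cs.foldl (fun t c => t + (c.toNat : Int)) 0) * 137) 0xFFFFFFFF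
  altFlush (cs.foldl altStep ([], 0, 0, seed0, 0))

-- ===== PRECONDITION & SPEC =====
def Spec_expand_message_deterministic (text : String) (out : List Int × Int) : Prop := out = expand_message_deterministic_alt text
instance (text : String) (out : List Int × Int) : Decidable (Spec_expand_message_deterministic text out) := by unfold Spec_expand_message_deterministic; infer_instance

-- ===== CLAIM (what is proved, stated in full; the proofs are below) =====
def Claim_equal_expand_message_deterministic : Prop := ∀ (text : String), Dom_expand_message_deterministic text → Spec_expand_message_deterministic text (expand_message_deterministic text)

-- ===== LEMMAS AND PROOFS =====

-- seed update, byte read (space-defaulted), emitted word, and the word stream, all proof-side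
def upd (s : Int) : Int :=
  PySem.Int.band (PySem.Int.bxor (rotate_left s 5) (PySem.Int.band (s * 71) 0xFFFFFFFF)) 0xFFFFFFFF

def ordP (cs : List Char) (j : Nat) : Int := ((cs.getD j ' ').toNat : Int)

def emitW (cs : List Char) (seed i : Int) : Int :=
  PySem.Int.band (PySem.Int.bxor
    (PySem.Int.band (PySem.Int.bor (PySem.Int.bor (PySem.Int.bor
      (ordP cs 0) ((ordP cs 1) <<< (8 : Nat))) ((ordP cs 2) <<< (16 : Nat))) ((ordP cs 3) <<< (24 : Nat))) 0xFFFFFFFF)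
    (PySem.Int.band (seed >>> (PySem.Int.mod i 16).toNat) 0xFFFFFFFF)) 0xFFFFFFFF

def W : List Char → Int → Int → List Int
  | [], _, _ => []
  | c :: t, seed, i => emitW (c :: t) seed i :: W (t.drop 3) (upd seed) (i + 1)
termination_by cs _ _ => cs.length
decreasing_by simp [List.length_drop]

lemma W_cons (cs : List Char) (seed i : Int) (h : cs ≠ []) :
    W cs seed i = emitW cs seed i :: W (cs.drop 4) (upd seed) (i + 1) := by
  cases cs with
  | nil => exact absurd rfl h
  | cons c t =>
    rw [show List.drop 4 (c :: t) = t.drop 3 from rfl, W]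

lemma zbor (a : Int) : PySem.Int.bor 0 a = a := by
  rw [PySem.Int.bor_comm, PySem.Int.bor_zero]

lemma ordP_drop (cs : List Char) (n j : Nat) : ordP (cs.drop n) j = ordP cs (n + j) := by
  simp [ordP, List.getD_eq_getElem?_getD, List.getElem?_drop]

lemma ordP_split (cs : List Char) (n : Nat) :
    ordP cs n = if n < cs.length then ((cs.getD n ' ').toNat : Int) else 32 := by
  unfold ordP
  split_ifs with h
  · rfl
  · rw [List.getD_eq_default _ _ (by omega)]; decide

-- A's per-chunk state (proof-side name for the inner loop of port A)
def chunkA (cs : List Char) (i : Int) : List Int :=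
  (PySem.List.pyRange 0 4 1).foldl
    (fun ch j =>
      if i * 4 + j < (cs.length : Int) then
        PySem.List.pySetD ch j ((PySem.List.pyGetD cs (i * 4 + j) ' ').toNat : Int)
      else ch)
    [32, 32, 32, 32]

lemma chunkA_eq (cs : List Char) (k : Nat) :
    chunkA cs (k : Int) = [ordP cs (4 * k), ordP cs (4 * k + 1), ordP cs (4 * k + 2), ordP cs (4 * k + 3)] := by
  unfold chunkA
  rw [show PySem.List.pyRange 0 4 1 = [0, 1, 2, 3] from by decide]
  simp only [List.foldl_cons, List.foldl_nil]
  have e0 : (k : Int) * 4 + 0 = ((4 * k : Nat) : Int) := by push_cast; ring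
  have e1 : (k : Int) * 4 + 1 = ((4 * k + 1 : Nat) : Int) := by push_cast; ring
  have e2 : (k : Int) * 4 + 2 = ((4 * k + 2 : Nat) : Int) := by push_cast; ring
  have e3 : (k : Int) * 4 + 3 = ((4 * k + 3 : Nat) : Int) := by push_cast; ring
  rw [e0, e1, e2, e3]
  rw [ordP_split cs (4 * k), ordP_split cs (4 * k + 1), ordP_split cs (4 * k + 2), ordP_split cs (4 * k + 3)]
  simp only [PySem.List.pyGetD_natCast, Nat.cast_lt]
  split_ifs <;> simp [PySem.List.pySetD, PySem.List.pySet?, PySem.List.pyIdx?]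

-- head of A's block loop = emitW of the suffix
lemma packA (cs : List Char) (k : Nat) (seed : Int) :
    PySem.Int.band (PySem.Int.bxor
      (PySem.Int.band (PySem.Int.bor (PySem.Int.bor (PySem.Int.bor
        (PySem.List.pyGetD (chunkA cs (k : Int)) 0 0)
        ((PySem.List.pyGetD (chunkA cs (k : Int)) 1 0) <<< 8))
        ((PySem.List.pyGetD (chunkA cs (k : Int)) 2 0) <<< 16))
        ((PySem.List.pyGetD (chunkA cs (k : Int)) 3 0) <<< 24)) 0xFFFFFFFF)
      (PySem.Int.band (seed >>> (PySem.Int.mod (k : Int) 16).toNat) 0xFFFFFFFF)) 0xFFFFFFFF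
    = emitW (cs.drop (4 * k)) seed (k : Int) := by
  rw [chunkA_eq]
  unfold emitW
  rw [show (8:ℤ) = ((8:ℕ):ℤ) from rfl, show (16:ℤ) = ((16:ℕ):ℤ) from rfl,
      show (24:ℤ) = ((24:ℕ):ℤ) from rfl,
      Int.shiftLeft_natCast_right, Int.shiftLeft_natCast_right, Int.shiftLeft_natCast_right]
  simp [ordP_drop, PySem.List.pyGetD]

-- A's range loop, generalized: starting at block j with the right block count
lemma foldA (cs : List Char) :
    ∀ (N j : Nat) (blocks : List Int) (seed : Int), N = (cs.length - 4 * j + 3) / 4 →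
    (List.foldl (fun (st : List Int × Int) (k : Nat) =>
        (st.1 ++ [PySem.Int.band (PySem.Int.bxor
          (PySem.Int.band (PySem.Int.bor (PySem.Int.bor (PySem.Int.bor
            (PySem.List.pyGetD (chunkA cs (k : Int)) 0 0)
            ((PySem.List.pyGetD (chunkA cs (k : Int)) 1 0) <<< 8))
            ((PySem.List.pyGetD (chunkA cs (k : Int)) 2 0) <<< 16))
            ((PySem.List.pyGetD (chunkA cs (k : Int)) 3 0) <<< 24)) 0xFFFFFFFF)
          (PySem.Int.band (st.2 >>> (PySem.Int.mod (k : Int) 16).toNat) 0xFFFFFFFF)) 0xFFFFFFFF],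
         upd st.2)) (blocks, seed) (List.range' j N)).1
    = blocks ++ W (cs.drop (4 * j)) seed (j : Int) := by
  intro N
  induction N with
  | zero =>
    intro j blocks seed hk
    have h : cs.drop (4 * j) = [] := List.drop_eq_nil_of_le (by omega)
    simp [List.range', h, W]
  | succ N ih =>
    intro j blocks seed hk
    have hne : cs.drop (4 * j) ≠ [] := by
      simp only [ne_eq, List.drop_eq_nil_iff]
      omega
    rw [List.range'_succ, List.foldl_cons]
    rw [ih (j + 1) _ _ (by omega)]
    rw [W_cons _ _ _ hne, packA]
    rw [show (cs.drop (4 * j)).drop 4 = cs.drop (4 * (j + 1)) from by rw [List.drop_drop]; ring_nf]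
    rw [show ((j + 1 : Nat) : Int) = (j : Int) + 1 from by push_cast; ring]
    simp

-- B's streaming loop + flush, by chunks of four characters

-- reduction of one altStep at each literal byte position
lemma altStep0 (blocks : List Int) (acc seed i : Int) (a : Char) :
    altStep (blocks, acc, 0, seed, i) a
      = (blocks, PySem.Int.bor acc ((a.toNat : Int) <<< (0 : Nat)), 1, seed, i) := rfl

lemma altStep1 (blocks : List Int) (acc seed i : Int) (a : Char) :
    altStep (blocks, acc, 1, seed, i) a
      = (blocks, PySem.Int.bor acc ((a.toNat : Int) <<< (8 : Nat)), 2, seed, i) := rfl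

lemma altStep2 (blocks : List Int) (acc seed i : Int) (a : Char) :
    altStep (blocks, acc, 2, seed, i) a
      = (blocks, PySem.Int.bor acc ((a.toNat : Int) <<< (16 : Nat)), 3, seed, i) := rfl

lemma altStep3 (blocks : List Int) (acc seed i : Int) (a : Char) :
    altStep (blocks, acc, 3, seed, i) a
      = (blocks ++ [PySem.Int.band (PySem.Int.bxor
           (PySem.Int.band (PySem.Int.bor acc ((a.toNat : Int) <<< (24 : Nat))) 0xFFFFFFFF)
           (PySem.Int.band (seed >>> (PySem.Int.mod i 16).toNat) 0xFFFFFFFF)) 0xFFFFFFFF],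
         0, 0, upd seed, i + 1) := rfl

-- reduction of altFlush at each literal pending count
lemma altFlush0 (blocks : List Int) (acc seed i : Int) :
    altFlush (blocks, acc, 0, seed, i) = (blocks, i) := rfl

lemma altFlush1 (blocks : List Int) (acc seed i : Int) :
    altFlush (blocks, acc, 1, seed, i)
      = (blocks ++ [PySem.Int.band (PySem.Int.bxor
           (PySem.Int.band (PySem.Int.bor (PySem.Int.bor (PySem.Int.bor acc
             ((32 : Int) <<< (8 : Nat))) ((32 : Int) <<< (16 : Nat))) ((32 : Int) <<< (24 : Nat))) 0xFFFFFFFF)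
           (PySem.Int.band (seed >>> (PySem.Int.mod i 16).toNat) 0xFFFFFFFF)) 0xFFFFFFFF],
         i + 1) := rfl

lemma altFlush2 (blocks : List Int) (acc seed i : Int) :
    altFlush (blocks, acc, 2, seed, i)
      = (blocks ++ [PySem.Int.band (PySem.Int.bxor
           (PySem.Int.band (PySem.Int.bor (PySem.Int.bor acc
             ((32 : Int) <<< (16 : Nat))) ((32 : Int) <<< (24 : Nat))) 0xFFFFFFFF)
           (PySem.Int.band (seed >>> (PySem.Int.mod i 16).toNat) 0xFFFFFFFF)) 0xFFFFFFFF],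
         i + 1) := rfl

lemma altFlush3 (blocks : List Int) (acc seed i : Int) :
    altFlush (blocks, acc, 3, seed, i)
      = (blocks ++ [PySem.Int.band (PySem.Int.bxor
           (PySem.Int.band (PySem.Int.bor acc ((32 : Int) <<< (24 : Nat))) 0xFFFFFFFF)
           (PySem.Int.band (seed >>> (PySem.Int.mod i 16).toNat) 0xFFFFFFFF)) 0xFFFFFFFF],
         i + 1) := rfl

lemma foldB (cs : List Char) :
    ∀ (blocks : List Int) (seed i : Int),
    altFlush (cs.foldl altStep (blocks, 0, 0, seed, i))
      = (blocks ++ W cs seed i, i + (((cs.length + 3) / 4 : Nat) : Int)) :=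
  match cs with
  | [] => by
    intro blocks seed i
    simp [W, altFlush0]
  | [a] => by
    intro blocks seed i
    simp only [List.foldl_cons, List.foldl_nil, altStep0, altFlush1]
    simp [W, emitW, ordP, zbor]
  | [a, b] => by
    intro blocks seed i
    simp only [List.foldl_cons, List.foldl_nil, altStep0, altStep1, altFlush2]
    simp [W, emitW, ordP, zbor]
  | [a, b, c] => by
    intro blocks seed i
    simp only [List.foldl_cons, List.foldl_nil, altStep0, altStep1, altStep2, altFlush3]
    simp [W, emitW, ordP, zbor]
  | a :: b :: c :: d :: t => by
    intro blocks seed i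
    simp only [List.foldl_cons, altStep0, altStep1, altStep2, altStep3]
    rw [foldB t]
    rw [W_cons (a :: b :: c :: d :: t) seed i (by simp),
        show (a :: b :: c :: d :: t).drop 4 = t from rfl]
    simp only [Prod.mk.injEq, List.length_cons]
    refine ⟨?_, by push_cast; omega⟩
    simp [emitW, ordP, zbor]
termination_by cs.length

-- ===== VERDICT (by name: the statement is the Claim_ definition above) =====
theorem expand_message_deterministic_spec : Claim_equal_expand_message_deterministic := by
  intro text _
  unfold Spec_expand_message_deterministic
  simp only [expand_message_deterministic, expand_message_deterministic_alt]
  set cs := text.toList with hcs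
  set n : Int := PySem.Int.floordiv ((cs.length : Int) + 3) 4 with hn
  rw [show sum_ascii cs = cs.foldl (fun t c => t + (c.toNat : Int)) 0 from rfl]
  rw [foldB]
  set seed0 := PySem.Int.band ((cs.foldl (fun t c => t + (c.toNat : Int)) 0) * 137) 0xFFFFFFFF with hseed
  simp only [Prod.mk.injEq]
  have hdiv : n.toNat = (cs.length + 3) / 4 := by
    rw [hn, PySem.Int.floordiv_eq_ediv_of_pos (by norm_num)]
    omega
  refine ⟨?_, by rw [hn, PySem.Int.floordiv_eq_ediv_of_pos (by norm_num)]; omega⟩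
  rw [PySem.List.pyRange_one 0 n, List.foldl_map]
  simp only [zero_add, sub_zero]
  rw [List.range_eq_range']
  have h := foldA cs n.toNat 0 [] seed0 (by omega)
  simp only [Nat.mul_zero, List.drop_zero, Nat.cast_zero, List.nil_append] at h
  exact h.trans (by simp)
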